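-- pv_equiv track=rewrite | github.com/enricotomasi/GeeksforGeeks_problems | Easy/Split the binary string into substrings with equal number of 0s and 1s.py | maxSubStr
-- ===== SOURCE A (Python) =====
-- def maxSubStr(str):
--     #Write your code here
--     n = len(str)
--
--     zn = 0
--     on = 0
--
--     z = []
--     o = []
--
--     for c in str:
--         if c == "0":
--             zn += 1
--         elif c == "1":
--             on += 1
--
--         z += [zn]
--         o += [on]
--
--     ans = 0
--
--     for i in range(n):
--         if z[i] == o[i]:
--             ans += 1
--
--     if ans == 0 or (z[n-1] != o[n-1]):
--         return -1
--
--     return ans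
-- ===== SOURCE B (Python) =====
-- def maxSubStr(str):
--     bal = 0
--     ans = 0
--     for c in str:
--         if c == "0":
--             bal += 1
--         elif c == "1":
--             bal -= 1
--         if bal == 0:
--             ans += 1
--     if ans == 0 or bal != 0:
--         return -1
--     return ans
-- ===== Notes on version B (the rewrite author's own statement) =====
-- stated objective: simpler
-- what changed: Single pass with one running balance and an answer counter instead of building two prefix-count arrays and re-scanning them with a second index loop.
import Mathlib
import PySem

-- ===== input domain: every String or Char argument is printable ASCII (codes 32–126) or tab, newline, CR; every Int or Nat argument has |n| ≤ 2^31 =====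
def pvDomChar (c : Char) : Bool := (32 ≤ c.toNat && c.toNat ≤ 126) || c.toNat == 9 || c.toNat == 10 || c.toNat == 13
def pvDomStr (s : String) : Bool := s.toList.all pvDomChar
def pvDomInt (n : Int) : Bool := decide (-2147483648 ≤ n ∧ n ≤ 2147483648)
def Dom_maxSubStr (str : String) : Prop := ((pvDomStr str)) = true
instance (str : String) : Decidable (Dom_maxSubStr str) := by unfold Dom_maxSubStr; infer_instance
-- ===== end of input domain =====

-- B replaces A's two prefix-count arrays and second index loop by a single pass
-- with one running balance (objective: simpler, O(1) extra space).

-- ===== PORT A =====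
-- loop body of A's first pass: state (zn, on, z, o)
def stepA (s : Int × Int × List Int × List Int) (c : Char) : Int × Int × List Int × List Int :=
  let zn := if c = '0' then s.1 + 1 else s.1
  let on := if c = '0' then s.2.1 else if c = '1' then s.2.1 + 1 else s.2.1
  (zn, on, s.2.2.1 ++ [zn], s.2.2.2 ++ [on])

def maxSubStr (str : String) : Int :=
  let n : Int := PySem.Str.len str
  let st := str.toList.foldl stepA (0, 0, [], [])
  let z := st.2.2.1
  let o := st.2.2.2
  let ans := (PySem.List.pyRange 0 n 1).foldl
    (fun ans i => if PySem.List.pyGetD z i 0 = PySem.List.pyGetD o i 0 then ans + 1 else ans)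
    (0 : Int)
  if ans = 0 ∨ PySem.List.pyGetD z (n - 1) 0 ≠ PySem.List.pyGetD o (n - 1) 0 then -1 else ans

-- ===== PORT B =====
-- loop body of B's single pass: state (bal, ans)
def stepB (s : Int × Int) (c : Char) : Int × Int :=
  let bal := if c = '0' then s.1 + 1 else if c = '1' then s.1 - 1 else s.1
  (bal, if bal = 0 then s.2 + 1 else s.2)

def maxSubStr_alt (str : String) : Int :=
  let st := str.toList.foldl stepB (0, 0)
  if st.2 = 0 ∨ st.1 ≠ 0 then -1 else st.2

-- ===== PRECONDITION & SPEC =====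
def Spec_maxSubStr (str : String) (out : Int) : Prop := out = maxSubStr_alt str
instance (str : String) (out : Int) : Decidable (Spec_maxSubStr str out) := by unfold Spec_maxSubStr; infer_instance

-- ===== CLAIM (what is proved, stated in full; the proofs are below) =====
def Claim_equal_maxSubStr : Prop := ∀ (str : String), Dom_maxSubStr str → Spec_maxSubStr str (maxSubStr str)

-- ===== LEMMAS AND PROOFS =====

-- final zero-count / one-count of A's first pass
def zfin : List Char → Int → Int
  | [], zn => zn
  | c :: cs, zn => zfin cs (if c = '0' then zn + 1 else zn)

def ofin : List Char → Int → Int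
  | [], on => on
  | c :: cs, on => ofin cs (if c = '0' then on else if c = '1' then on + 1 else on)

-- A's prefix arrays
def zpref : List Char → Int → List Int
  | [], _ => []
  | c :: cs, zn =>
    let zn' := if c = '0' then zn + 1 else zn
    zn' :: zpref cs zn'

def opref : List Char → Int → List Int
  | [], _ => []
  | c :: cs, on =>
    let on' := if c = '0' then on else if c = '1' then on + 1 else on
    on' :: opref cs on'

-- number of positions where the two prefix counts agree
def cnt : List Char → Int → Int → Int
  | [], _, _ => 0
  | c :: cs, zn, on =>
    let zn' := if c = '0' then zn + 1 else zn
    let on' := if c = '0' then on else if c = '1' then on + 1 else on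
    (if zn' = on' then 1 else 0) + cnt cs zn' on'

lemma loopA_eq : ∀ (cs : List Char) (zn on : Int) (z o : List Int),
    List.foldl stepA (zn, on, z, o) cs =
      (zfin cs zn, ofin cs on, z ++ zpref cs zn, o ++ opref cs on) := by
  intro cs
  induction cs with
  | nil => intro zn on z o; simp [zfin, ofin, zpref, opref]
  | cons c cs ih =>
    intro zn on z o
    simp only [List.foldl_cons, stepA, zfin, ofin, zpref, opref, ih, List.append_assoc,
      List.cons_append, List.nil_append]

lemma loopB_eq : ∀ (cs : List Char) (zn on a : Int),
    List.foldl stepB (zn - on, a) cs =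
      (zfin cs zn - ofin cs on, a + cnt cs zn on) := by
  intro cs
  induction cs with
  | nil => intro zn on a; simp [zfin, ofin, cnt]
  | cons c cs ih =>
    intro zn on a
    rw [List.foldl_cons]
    by_cases h0 : c = '0'
    · have hb : stepB (zn - on, a) c = (zn + 1 - on, if zn + 1 = on then a + 1 else a) := by
        have hcond : zn - on + 1 = 0 ↔ zn + 1 = on := by omega
        have hcond' : zn + 1 - on = 0 ↔ zn + 1 = on := by omega
        have harg : zn - on + 1 = zn + 1 - on := by ring
        simp [stepB, h0, harg, hcond']
      rw [hb, ih (zn + 1) on]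
      simp only [zfin, ofin, cnt, if_pos h0]
      refine Prod.ext rfl ?_
      simp only []
      split_ifs <;> ring
    · by_cases h1 : c = '1'
      · have hb : stepB (zn - on, a) c = (zn - (on + 1), if zn = on + 1 then a + 1 else a) := by
          have hcond : zn - on - 1 = 0 ↔ zn = on + 1 := by omega
          have hcond' : zn - (on + 1) = 0 ↔ zn = on + 1 := by omega
          have harg : zn - on - 1 = zn - (on + 1) := by ring
          simp [stepB, h1, harg, hcond']
        rw [hb, ih zn (on + 1)]
        simp only [zfin, ofin, cnt, if_neg h0, if_pos h1]
        refine Prod.ext rfl ?_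
        simp only []
        split_ifs <;> ring
      · have hb : stepB (zn - on, a) c = (zn - on, if zn = on then a + 1 else a) := by
          have hcond : zn - on = 0 ↔ zn = on := by omega
          simp [stepB, h0, h1, hcond]
        rw [hb, ih zn on]
        simp only [zfin, ofin, cnt, if_neg h0, if_neg h1]
        refine Prod.ext rfl ?_
        simp only []
        split_ifs <;> ring

-- pairwise equal-entry count of two lists
def eqcnt : List Int → List Int → Int
  | x :: xs, y :: ys => (if x = y then 1 else 0) + eqcnt xs ys
  | _, _ => 0

lemma eqcnt_pref : ∀ (cs : List Char) (zn on : Int),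
    eqcnt (zpref cs zn) (opref cs on) = cnt cs zn on := by
  intro cs
  induction cs with
  | nil => intro zn on; simp [zpref, opref, eqcnt, cnt]
  | cons c cs ih => intro zn on; simp [zpref, opref, eqcnt, cnt, ih]

lemma length_zpref (cs : List Char) : ∀ zn, (zpref cs zn).length = cs.length := by
  induction cs with
  | nil => intro zn; simp [zpref]
  | cons c cs ih => intro zn; simp [zpref, ih]

lemma length_opref (cs : List Char) : ∀ on, (opref cs on).length = cs.length := by
  induction cs with
  | nil => intro on; simp [opref]
  | cons c cs ih => intro on; simp [opref, ih]

lemma zpref_last (cs : List Char) (h : cs ≠ []) :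
    ∀ zn, (zpref cs zn).getD (cs.length - 1) 0 = zfin cs zn := by
  induction cs with
  | nil => exact absurd rfl h
  | cons c cs ih =>
    intro zn
    rcases cs with _ | ⟨d, ds⟩
    · simp [zpref, zfin]
    · have := ih (by simp)
      simp only [zpref, zfin, List.length_cons]
      simpa using this _

lemma opref_last (cs : List Char) (h : cs ≠ []) :
    ∀ on, (opref cs on).getD (cs.length - 1) 0 = ofin cs on := by
  induction cs with
  | nil => exact absurd rfl h
  | cons c cs ih =>
    intro on
    rcases cs with _ | ⟨d, ds⟩
    · simp [opref, ofin]
    · have := ih (by simp)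
      simp only [opref, ofin, List.length_cons]
      simpa using this _

-- A's second loop counts pairwise-equal entries
lemma rngfold : ∀ (z o : List Int), o.length = z.length → ∀ (a : Int),
    (List.range z.length).foldl
      (fun acc k => if z.getD k 0 = o.getD k 0 then acc + 1 else acc) a
      = a + eqcnt z o := by
  intro z
  induction z with
  | nil => intro o h a; cases o <;> simp_all [eqcnt]
  | cons x xs ih =>
    intro o h a
    rcases o with _ | ⟨y, ys⟩
    · simp at h
    · simp only [List.length_cons, List.range_succ_eq_map, List.foldl_cons, List.foldl_map,
        List.getD_cons_zero, List.getD_cons_succ]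
      rw [ih ys (by simpa using h)]
      simp only [eqcnt]
      split_ifs <;> ring

-- ===== VERDICT (by name: the statement is the Claim_ definition above) =====
theorem maxSubStr_spec : Claim_equal_maxSubStr := by
  intro s _
  unfold Spec_maxSubStr maxSubStr maxSubStr_alt
  have hA := loopA_eq s.toList 0 0 [] []
  have hB := loopB_eq s.toList 0 0 0
  simp only [List.nil_append] at hA
  norm_num at hB
  simp only [hA, hB, PySem.Str.len_eq]
  rcases hcs : s.toList with _ | ⟨c, cs⟩
  · simp [zpref, opref, PySem.List.pyRange, PySem.List.pyGetD, cnt]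
  · set l := c :: cs with hl
    have hne : l ≠ [] := by simp [hl]
    have hlen : (zpref l 0).length = l.length := length_zpref l 0
    have holen : (opref l 0).length = l.length := length_opref l 0
    -- turn the pyRange fold into a range fold
    rw [PySem.List.pyRange_one]
    simp only [sub_zero, Int.toNat_natCast, List.foldl_map, zero_add,
      PySem.List.pyGetD_natCast]
    have hfold : (List.range l.length).foldl
        (fun acc k => if (zpref l 0).getD k 0 = (opref l 0).getD k 0 then acc + 1 else acc)
        (0 : Int) = cnt l 0 0 := by
      rw [← hlen, rngfold (zpref l 0) (opref l 0) (by rw [holen, hlen]) 0, eqcnt_pref]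
      exact zero_add _
    rw [hfold]
    -- the final index n-1
    have hz : PySem.List.pyGetD (zpref l 0) ((l.length : Int) - 1) 0 = zfin l 0 := by
      have h1 : ((l.length : Int) - 1) = ((l.length - 1 : Nat) : Int) := by
        have : 1 ≤ l.length := by simp [hl]
        omega
      rw [h1, PySem.List.pyGetD_natCast]
      exact zpref_last l hne 0
    have ho : PySem.List.pyGetD (opref l 0) ((l.length : Int) - 1) 0 = ofin l 0 := by
      have h1 : ((l.length : Int) - 1) = ((l.length - 1 : Nat) : Int) := by
        have : 1 ≤ l.length := by simp [hl]
        omega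
      rw [h1, PySem.List.pyGetD_natCast]
      exact opref_last l hne 0
    rw [hz, ho]
    simp only [ne_eq, sub_eq_zero]
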